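-- pv_equiv track=rewrite | github.com/sree314/pj3d | bin/parse_cli.py | clean_settings
-- ===== SOURCE A (Python) =====
-- def clean_settings(settings):
--     dup_allow = set() # settings for which duplicates don't mean override
--     disable = set(["day", "time"]) # settings which should be commented out
--
--     already_seen = set()
--     out = []
--     for scope, k, v in reversed(settings):
--         action = None
--
--         if k in disable:
--             action = "disable"
--         elif k not in dup_allow:
--             s = (scope, k)
--             if s in already_seen:
--                 action = "duplicate"
--             else:
--                 action = "ok"
--                 already_seen.add((scope, k))
--         else:
--            action = "ok"
--
--         assert action is not None
--         out.append((action, (scope, k, v)))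
--
--     return list(reversed(out))
-- ===== SOURCE B (Python) =====
-- def clean_settings(settings):
--     disable = set(["day", "time"])
--
--     # pass 1: last occurrence index of each (scope, key)
--     last = {}
--     for i, (scope, k, v) in enumerate(settings):
--         last[(scope, k)] = i
--
--     # pass 2: classify each entry in forward order
--     out = []
--     for i, (scope, k, v) in enumerate(settings):
--         if k in disable:
--             action = "disable"
--         elif last[(scope, k)] == i:
--             action = "ok"
--         else:
--             action = "duplicate"
--         out.append((action, (scope, k, v)))
--     return out
-- ===== Notes on version B (the rewrite author's own statement) =====
-- stated objective: alternative
-- what changed: Replaces the reverse traversal with a seen-set and final re-reversal by two forward passes: a dict mapping (scope,key) to its last occurrence index, then a forward classification comparing each index against that dict.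
import Mathlib
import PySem

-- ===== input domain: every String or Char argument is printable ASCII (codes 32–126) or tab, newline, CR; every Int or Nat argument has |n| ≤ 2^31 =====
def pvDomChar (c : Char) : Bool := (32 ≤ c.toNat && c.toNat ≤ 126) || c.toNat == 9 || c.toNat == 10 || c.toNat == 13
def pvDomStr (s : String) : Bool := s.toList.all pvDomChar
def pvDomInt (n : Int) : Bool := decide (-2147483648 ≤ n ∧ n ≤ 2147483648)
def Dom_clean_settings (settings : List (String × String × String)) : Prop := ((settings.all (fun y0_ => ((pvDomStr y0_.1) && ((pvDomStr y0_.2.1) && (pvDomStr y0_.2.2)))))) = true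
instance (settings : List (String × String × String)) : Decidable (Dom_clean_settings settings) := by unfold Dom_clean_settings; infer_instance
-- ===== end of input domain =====

-- B replaces A's reverse pass with a seen-set (plus final re-reversal) by two forward passes:
-- a dict of last occurrence indices, then a forward classification; same return value (alternative decomposition).

-- ===== PORT A =====
def clean_settings (settings : List (String × String × String)) : List (String × (String × String × String)) :=
  let dup_allow : PySem.Set String := PySem.Set.empty
  let disable : PySem.Set String := PySem.Set.ofList ["day", "time"]
  let st := settings.reverse.foldl
    (fun (st : PySem.Set (String × String) × List (String × (String × String × String))) x =>
      let scope := x.1; let k := x.2.1; let v := x.2.2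
      if PySem.Set.contains disable k then
        (st.1, st.2 ++ [("disable", (scope, k, v))])
      else if !(PySem.Set.contains dup_allow k) then
        (if PySem.Set.contains st.1 (scope, k) then
          (st.1, st.2 ++ [("duplicate", (scope, k, v))])
        else
          (PySem.Set.add st.1 (scope, k), st.2 ++ [("ok", (scope, k, v))]))
      else
        (st.1, st.2 ++ [("ok", (scope, k, v))]))
    (PySem.Set.empty, ([] : List (String × (String × String × String))))
  st.2.reverse

-- ===== PORT B =====
-- note: `last[(scope, k)]` in Source B never raises (the key is present by construction);
-- the getD default -1 is never an index, so it is exact.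
def clean_settings_alt (settings : List (String × String × String)) : List (String × (String × String × String)) :=
  let disable : PySem.Set String := PySem.Set.ofList ["day", "time"]
  let last := (PySem.List.enumerate settings 0).foldl
    (fun (d : PySem.Dict (String × String) Int) p => d.insert (p.2.1, p.2.2.1) p.1)
    PySem.Dict.empty
  (PySem.List.enumerate settings 0).foldl
    (fun out p =>
      let i := p.1; let scope := p.2.1; let k := p.2.2.1; let v := p.2.2.2
      if PySem.Set.contains disable k then out ++ [("disable", (scope, k, v))]
      else if last.getD (scope, k) (-1) == i then out ++ [("ok", (scope, k, v))]
      else out ++ [("duplicate", (scope, k, v))])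
    []

-- ===== PRECONDITION & SPEC =====
def Spec_clean_settings (settings : List (String × String × String)) (out : List (String × (String × String × String))) : Prop := out = clean_settings_alt settings
instance (settings : List (String × String × String)) (out : List (String × (String × String × String))) : Decidable (Spec_clean_settings settings out) := by unfold Spec_clean_settings; infer_instance

-- ===== CLAIM (what is proved, stated in full; the proofs are below) =====
def Claim_equal_clean_settings : Prop := ∀ (settings : List (String × String × String)), Dom_clean_settings settings → Spec_clean_settings settings (clean_settings settings)

-- ===== LEMMAS AND PROOFS =====

def pvKey (x : String × String × String) : String × String := (x.1, x.2.1)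
def pvDis (x : String × String × String) : Bool := PySem.Set.contains (PySem.Set.ofList ["day", "time"]) x.2.1

-- A's loop step (identical to the lambda inside clean_settings, lets reduced)
-- A's loop step (definitionally the lambda inside clean_settings, lets reduced)
def pvStep (st : PySem.Set (String × String) × List (String × (String × String × String)))
    (x : String × String × String) : PySem.Set (String × String) × List (String × (String × String × String)) :=
  if pvDis x then
    (st.1, st.2 ++ [("disable", x)])
  else if !(PySem.Set.contains PySem.Set.empty x.2.1) then
    (if PySem.Set.contains st.1 (pvKey x) then
      (st.1, st.2 ++ [("duplicate", x)])
    else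
      (PySem.Set.add st.1 (pvKey x), st.2 ++ [("ok", x)]))
  else
    (st.1, st.2 ++ [("ok", x)])

def pvAOut : List (String × String × String) → PySem.Set (String × String) → List (String × (String × String × String))
  | [], _ => []
  | x :: t, seen =>
    if pvDis x then ("disable", x) :: pvAOut t seen
    else if PySem.Set.contains seen (pvKey x) then ("duplicate", x) :: pvAOut t seen
    else ("ok", x) :: pvAOut t (PySem.Set.add seen (pvKey x))

def pvASeen : List (String × String × String) → PySem.Set (String × String) → PySem.Set (String × String)
  | [], seen => seen
  | x :: t, seen =>
    pvASeen t (if pvDis x then seen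
               else if PySem.Set.contains seen (pvKey x) then seen
               else PySem.Set.add seen (pvKey x))

def pvBSeen : List (String × String × String) → PySem.Set (String × String) → List (String × (String × String × String))
  | [], _ => []
  | x :: t, seen =>
    ((if pvDis x then "disable"
      else if PySem.Set.contains seen (pvKey x) || t.any (fun y => !pvDis y && (pvKey y == pvKey x)) then "duplicate"
      else "ok"), x) :: pvBSeen t seen

def pvBOut : List (String × String × String) → List (String × (String × String × String))
  | [] => []
  | x :: t =>
    ((if pvDis x then "disable"
      else if t.any (fun y => pvKey y == pvKey x) then "duplicate"
      else "ok"), x) :: pvBOut t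

lemma pvEmptyContains {α : Type} [BEq α] (k : α) : PySem.Set.contains PySem.Set.empty k = false := rfl

lemma pvFoldA (l : List (String × String × String)) (seen : PySem.Set (String × String))
    (out0 : List (String × (String × String × String))) :
    l.foldl pvStep (seen, out0) = (pvASeen l seen, out0 ++ pvAOut l seen) := by
  induction l generalizing seen out0 with
  | nil => simp [pvAOut, pvASeen]
  | cons x t ih =>
    rw [List.foldl_cons]
    cases hd : pvDis x with
    | true =>
      simp only [pvStep, pvAOut, pvASeen, hd, pvEmptyContains, Bool.not_false, if_true, ih]
      simp
    | false =>
      cases hc : PySem.Set.contains seen (pvKey x) with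
      | true =>
        simp only [pvStep, pvAOut, pvASeen, hd, hc, pvEmptyContains, Bool.not_false, if_true,
          Bool.false_eq_true, if_false, ih]
        simp
      | false =>
        simp only [pvStep, pvAOut, pvASeen, hd, hc, pvEmptyContains, Bool.not_false, if_true,
          Bool.false_eq_true, if_false, ih]
        simp

lemma pvAOut_append (ys zs : List (String × String × String)) (seen : PySem.Set (String × String)) :
    pvAOut (ys ++ zs) seen = pvAOut ys seen ++ pvAOut zs (pvASeen ys seen) := by
  induction ys generalizing seen with
  | nil => simp [pvAOut, pvASeen]
  | cons x t ih =>
    rw [List.cons_append]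
    cases hd : pvDis x with
    | true => simp only [pvAOut, pvASeen, hd, if_true, ih, List.cons_append]
    | false =>
      cases hc : PySem.Set.contains seen (pvKey x) with
      | true =>
        simp only [pvAOut, pvASeen, hd, hc, Bool.false_eq_true, if_false, ih]
        simp
      | false =>
        simp only [pvAOut, pvASeen, hd, hc, Bool.false_eq_true, if_false, ih,
          List.cons_append]

lemma pvASeen_mem (l : List (String × String × String)) (seen : PySem.Set (String × String)) (q : String × String) :
    q ∈ pvASeen l seen ↔ q ∈ seen ∨ ∃ y ∈ l, pvDis y = false ∧ pvKey y = q := by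
  induction l generalizing seen with
  | nil => simp [pvASeen]
  | cons x t ih =>
    cases hd : pvDis x with
    | true =>
      simp only [pvASeen, hd, if_true, ih, List.mem_cons]
      constructor
      · rintro (h | h)
        · exact Or.inl h
        · obtain ⟨y, hy, h2, h3⟩ := h
          exact Or.inr ⟨y, Or.inr hy, h2, h3⟩
      · rintro (h | ⟨y, (rfl | hy), h2, h3⟩)
        · exact Or.inl h
        · rw [hd] at h2; cases h2
        · exact Or.inr ⟨y, hy, h2, h3⟩
    | false =>
      have hmem : ∀ s : PySem.Set (String × String),
          q ∈ (if PySem.Set.contains s (pvKey x) then s else PySem.Set.add s (pvKey x)) ↔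
            q ∈ s ∨ pvKey x = q := by
        intro s
        cases hc : PySem.Set.contains s (pvKey x) with
        | true =>
          simp only [if_true]
          constructor
          · exact Or.inl
          · rintro (h | rfl)
            · exact h
            · exact (PySem.Set.contains_iff _ _).1 hc
        | false =>
          simp only [Bool.false_eq_true, if_false, PySem.Set.mem_add]
          constructor
          · rintro (h | rfl) ; exact Or.inl h; exact Or.inr rfl
          · rintro (h | rfl) ; exact Or.inl h; exact Or.inr rfl
      simp only [pvASeen, hd, Bool.false_eq_true, if_false, ih, hmem, List.mem_cons]
      constructor
      · rintro ((h | rfl) | ⟨y, hy, h2, h3⟩)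
        · exact Or.inl h
        · exact Or.inr ⟨x, Or.inl rfl, hd, rfl⟩
        · exact Or.inr ⟨y, Or.inr hy, h2, h3⟩
      · rintro (h | ⟨y, (rfl | hy), h2, h3⟩)
        · exact Or.inl (Or.inl h)
        · exact Or.inl (Or.inr h3)
        · exact Or.inr ⟨y, hy, h2, h3⟩

lemma pvA_eq_pvBSeen (s : List (String × String × String)) (seen : PySem.Set (String × String)) :
    (pvAOut s.reverse seen).reverse = pvBSeen s seen := by
  induction s with
  | nil => simp [pvAOut, pvBSeen]
  | cons x t ih =>
    have hrev : (x :: t).reverse = t.reverse ++ [x] := by simp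
    rw [hrev, pvAOut_append]
    have hσ : PySem.Set.contains (pvASeen t.reverse seen) (pvKey x) =
        (PySem.Set.contains seen (pvKey x) || t.any (fun y => !pvDis y && (pvKey y == pvKey x))) := by
      rw [Bool.eq_iff_iff]
      simp only [PySem.Set.contains_iff, pvASeen_mem, List.mem_reverse, Bool.or_eq_true,
        List.any_eq_true, Bool.and_eq_true, Bool.not_eq_true', beq_iff_eq]
    cases hd : pvDis x with
    | true =>
      simp only [pvAOut, pvBSeen, hd, if_true, List.reverse_append, ih]
      simp
    | false =>
      cases hc : PySem.Set.contains (pvASeen t.reverse seen) (pvKey x) with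
      | true =>
        simp only [pvAOut, pvBSeen, hd, hc, ← hσ, if_true, Bool.false_eq_true, if_false,
          List.reverse_append, ih]
        simp
      | false =>
        simp only [pvAOut, pvBSeen, hd, hc, ← hσ, Bool.false_eq_true, if_false,
          List.reverse_append, ih]
        simp

lemma pvBSeen_empty (s : List (String × String × String)) :
    pvBSeen s PySem.Set.empty = pvBOut s := by
  induction s with
  | nil => rfl
  | cons x t ih =>
    cases hd : pvDis x with
    | true => simp only [pvBSeen, pvBOut, hd, if_true, ih]
    | false =>
      have hany : t.any (fun y => !pvDis y && (pvKey y == pvKey x)) =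
          t.any (fun y => pvKey y == pvKey x) := by
        refine PySem.List.any_congr_mem (fun y hy => ?_)
        cases hk : (pvKey y == pvKey x) with
        | false => simp
        | true =>
          have hkey : pvKey y = pvKey x := beq_iff_eq.mp hk
          have h21 : y.2.1 = x.2.1 := congrArg Prod.snd hkey
          have : pvDis y = false := by
            simp only [pvDis, h21]
            exact hd
          simp [this]
      simp only [pvBSeen, pvBOut, hd, Bool.false_eq_true, if_false, hany, ih]
      simp only [pvEmptyContains, Bool.false_or]

lemma pvBOut_length (s : List (String × String × String)) : (pvBOut s).length = s.length := by
  induction s with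
  | nil => rfl
  | cons x t ih => simp [pvBOut, ih]

lemma pvBOut_getElem (s : List (String × String × String)) (j : Nat) (hj : j < s.length) :
    (pvBOut s)[j]'(by rw [pvBOut_length]; exact hj) =
      ((if pvDis s[j] then "disable"
        else if (s.drop (j+1)).any (fun y => pvKey y == pvKey s[j]) then "duplicate"
        else "ok"), s[j]) := by
  induction s generalizing j with
  | nil => simp at hj
  | cons x t ih =>
    cases j with
    | zero =>
      simp only [pvBOut, List.getElem_cons_zero, List.drop_succ_cons, List.drop_zero]
      rfl
    | succ j =>
      have hj' : j < t.length := by simpa using hj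
      simpa [pvBOut, List.drop_succ_cons] using ih j hj'

lemma pvLast (s : List (String × String × String)) (c j : Nat) (hj : j < s.length) :
    (((PySem.List.enumerate s (c : Int)).foldl
        (fun (d : PySem.Dict (String × String) Int) p => d.insert (p.2.1, p.2.2.1) p.1)
        PySem.Dict.empty).getD (pvKey s[j]) (-1) = (c : Int) + j)
      ↔ (s.drop (j+1)).any (fun y => pvKey y == pvKey s[j]) = false := by
  revert hj
  induction s using List.reverseRecOn generalizing j with
  | nil => intro hj; simp at hj
  | append_singleton ys x ih =>
    intro hj
    have hlen : (ys ++ [x]).length = ys.length + 1 := by simp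
    rw [PySem.List.enumerate_append, List.foldl_append]
    have hone : PySem.List.enumerate [x] ((c : Int) + ys.length) = [((c : Int) + ys.length, x)] := by
      simp [PySem.List.enumerate_cons]
    rw [hone]
    simp only [List.foldl_cons, List.foldl_nil]
    by_cases hj' : j = ys.length
    · subst hj'
      have hx : (ys ++ [x])[ys.length]'(by simp) = x := by
        simp
      have hdrop : (ys ++ [x]).drop (ys.length + 1) = [] := by
        apply List.drop_eq_nil_of_le; simp
      rw [hx, hdrop]
      constructor
      · intro _; simp
      · intro _
        have : ((List.foldl (fun d p => d.insert (p.2.1, p.2.2.1) p.1)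
            PySem.Dict.empty (PySem.List.enumerate ys (c : Int))).insert (x.1, x.2.1)
            ((c : Int) + ys.length)).getD (pvKey x) (-1) = (c : Int) + ys.length := by
          exact PySem.Dict.getD_insert_self _ _ _ _
        simpa using this
    · have hjlt : j < ys.length := by
        have : j < ys.length + 1 := by simpa using hj
        omega
      have hx : (ys ++ [x])[j]'(by simp; omega) = ys[j]'hjlt := List.getElem_append_left hjlt
      have hdrop : (ys ++ [x]).drop (j + 1) = ys.drop (j + 1) ++ [x] := by
        rw [List.drop_append_of_le_length (by omega)]
      rw [hx, hdrop]
      by_cases hk : pvKey x = pvKey (ys[j]'hjlt)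
      · have hgetD : ((List.foldl (fun d p => d.insert (p.2.1, p.2.2.1) p.1)
            PySem.Dict.empty (PySem.List.enumerate ys (c : Int))).insert (x.1, x.2.1)
            ((c : Int) + ys.length)).getD (pvKey (ys[j]'hjlt)) (-1) = (c : Int) + ys.length := by
          rw [← hk]
          exact PySem.Dict.getD_insert_self _ _ _ _
        rw [hgetD]
        constructor
        · intro h; exfalso; omega
        · intro h
          exfalso
          have : (pvKey x == pvKey (ys[j]'hjlt)) = true := beq_iff_eq.mpr hk
          simp [this] at h
      · have hgetD : ((List.foldl (fun d p => d.insert (p.2.1, p.2.2.1) p.1)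
            PySem.Dict.empty (PySem.List.enumerate ys (c : Int))).insert (x.1, x.2.1)
            ((c : Int) + ys.length)).getD (pvKey (ys[j]'hjlt)) (-1) =
            (List.foldl (fun d p => d.insert (p.2.1, p.2.2.1) p.1)
            PySem.Dict.empty (PySem.List.enumerate ys (c : Int))).getD (pvKey (ys[j]'hjlt)) (-1) := by
          exact PySem.Dict.getD_insert_of_ne _ _ _ (fun h : pvKey (ys[j]'hjlt) = (x.1, x.2.1) => hk h.symm)
        rw [hgetD]
        have hihyp := ih j hjlt
        rw [hihyp]
        have hxfalse : (pvKey x == pvKey (ys[j]'hjlt)) = false := by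
          simpa using hk
        simp [hxfalse]

def pvD (s : List (String × String × String)) : PySem.Dict (String × String) Int :=
  (PySem.List.enumerate s 0).foldl (fun d p => d.insert (p.2.1, p.2.2.1) p.1) PySem.Dict.empty

def pvF (s : List (String × String × String)) (p : Int × (String × String × String)) :
    String × (String × String × String) :=
  (if pvDis p.2 then "disable"
   else if (pvD s).getD (pvKey p.2) (-1) == p.1 then "ok"
   else "duplicate", p.2)

lemma pvB_eq_pvBOut (s : List (String × String × String)) :
    clean_settings_alt s = pvBOut s := by
  have h1 : clean_settings_alt s = (PySem.List.enumerate s 0).foldl (fun out p => out ++ [pvF s p]) [] := by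
    show (PySem.List.enumerate s 0).foldl
      (fun out p =>
        if pvDis p.2 then out ++ [("disable", p.2)]
        else if (pvD s).getD (pvKey p.2) (-1) == p.1 then out ++ [("ok", p.2)]
        else out ++ [("duplicate", p.2)]) [] = _
    refine PySem.List.foldl_congr_mem _ _ _ _ (fun acc p _ => ?_)
    simp only [pvF]
    split_ifs <;> rfl
  rw [h1, PySem.List.foldl_append_singleton_eq_map, List.nil_append]
  apply List.ext_getElem
  · simp [PySem.List.length_enumerate, pvBOut_length]
  · intro j hj1 hj2
    have hj : j < s.length := by simpa [PySem.List.length_enumerate] using hj1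
    rw [List.getElem_map, PySem.List.getElem_enumerate, pvBOut_getElem s j hj]
    have hL := pvLast s 0 j hj
    push_cast at hL
    rw [zero_add] at hL
    simp only [pvF, pvD, zero_add]
    by_cases hb : (List.drop (j + 1) s).any (fun y => pvKey y == pvKey s[j]) = false
    · have hgd := hL.mpr hb
      rw [hb]
      have : ((((PySem.List.enumerate s 0).foldl (fun d p => d.insert (p.2.1, p.2.2.1) p.1)
          PySem.Dict.empty).getD (pvKey s[j]) (-1)) == (j : Int)) = true := beq_iff_eq.mpr hgd
      rw [this]
      simp
    · have hany : (List.drop (j + 1) s).any (fun y => pvKey y == pvKey s[j]) = true := by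
        cases h : (List.drop (j + 1) s).any (fun y => pvKey y == pvKey s[j])
        · exact absurd h hb
        · rfl
      have hne : ¬ ((((PySem.List.enumerate s 0).foldl (fun d p => d.insert (p.2.1, p.2.2.1) p.1)
          PySem.Dict.empty).getD (pvKey s[j]) (-1)) = (j : Int)) := fun h => hb (hL.mp h)
      have hbeq : ((((PySem.List.enumerate s 0).foldl (fun d p => d.insert (p.2.1, p.2.2.1) p.1)
          PySem.Dict.empty).getD (pvKey s[j]) (-1)) == (j : Int)) = false := by
        simpa using hne
      rw [hany, hbeq]
      simp

-- ===== VERDICT (by name: the statement is the Claim_ definition above) =====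
theorem clean_settings_spec : Claim_equal_clean_settings := by
  intro s _
  show clean_settings s = clean_settings_alt s
  have hA : clean_settings s = (pvAOut s.reverse PySem.Set.empty).reverse := by
    show (s.reverse.foldl pvStep (PySem.Set.empty, [])).2.reverse = _
    rw [pvFoldA]; simp
  rw [hA, pvA_eq_pvBSeen, pvBSeen_empty, pvB_eq_pvBOut]
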